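-- pv_equiv track=rewrite | github.com/prabhuanantht/CodeSensei | intelligence_analyzer.py | _classify_pattern
-- ===== SOURCE A (Python) =====
-- from typing import Dict, List, Tuple, Any, Optional
--
-- def _classify_pattern(pattern: List[str]) -> str:
--     """Classify patterns by purpose"""
--     if any(
--         token.startswith("CALL:") and "download" in token.lower()
--         for token in pattern
--     ):
--         return "Web Scraping"
--     if any(
--         token.startswith("CALL:") and "regex" in token.lower() for token in pattern
--     ):
--         return "Regex Extraction"
--     if pattern.count("TRY_EXCEPT") >= 2:
--         return "Defensive Programming"
--     if pattern.count("CONDITIONAL") > 10: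
--         return "High Complexity"
--     if pattern.count("FOR_LOOP") + pattern.count("WHILE_LOOP") > 3:
--         return "Loop-Heavy Processing"
--     return "Standard Logic"
-- ===== SOURCE B (Python) =====
-- def _classify_pattern(pattern):
--     """Classify patterns by purpose (single pass over the tokens)."""
--     has_download = False
--     has_regex = False
--     try_c = 0
--     cond_c = 0
--     loop_c = 0
--     for token in pattern:
--         if token.startswith("CALL:"):
--             low = token.lower()
--             if "download" in low:
--                 has_download = True
--             if "regex" in low:
--                 has_regex = True
--         elif token == "TRY_EXCEPT":
--             try_c += 1
--         elif token == "CONDITIONAL":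
--             cond_c += 1
--         elif token == "FOR_LOOP" or token == "WHILE_LOOP":
--             loop_c += 1
--     if has_download:
--         return "Web Scraping"
--     if has_regex:
--         return "Regex Extraction"
--     if try_c >= 2:
--         return "Defensive Programming"
--     if cond_c > 10:
--         return "High Complexity"
--     if loop_c > 3:
--         return "Loop-Heavy Processing"
--     return "Standard Logic"
-- ===== Notes on version B (the rewrite author's own statement) =====
-- stated objective: faster
-- what changed: Replaces A's five separate scans (two any-generators and four list.count passes) by one pass that accumulates two boolean flags and three counters, then evaluates the same priority cascade once.
import Mathlib
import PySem

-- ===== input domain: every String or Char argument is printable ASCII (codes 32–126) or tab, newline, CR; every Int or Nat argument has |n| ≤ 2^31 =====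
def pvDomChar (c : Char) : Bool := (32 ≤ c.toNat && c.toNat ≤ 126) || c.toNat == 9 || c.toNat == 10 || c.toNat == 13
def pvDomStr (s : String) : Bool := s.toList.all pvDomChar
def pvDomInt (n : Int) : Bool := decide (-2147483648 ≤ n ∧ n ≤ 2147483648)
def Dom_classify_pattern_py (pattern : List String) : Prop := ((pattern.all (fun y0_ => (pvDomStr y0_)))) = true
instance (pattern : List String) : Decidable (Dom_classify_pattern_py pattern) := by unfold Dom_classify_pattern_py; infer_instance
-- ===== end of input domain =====

-- B replaces A's five separate scans of the token list by one accumulating pass; same cascade of labels.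


-- ===== PORT A =====
def classify_pattern_py (pattern : List String) : String :=
  if pattern.any (fun t => PySem.Str.startswith t "CALL:" && PySem.Str.isIn "download" (PySem.Str.lower t)) then
    "Web Scraping"
  else if pattern.any (fun t => PySem.Str.startswith t "CALL:" && PySem.Str.isIn "regex" (PySem.Str.lower t)) then
    "Regex Extraction"
  else if 2 ≤ PySem.List.count pattern "TRY_EXCEPT" then
    "Defensive Programming"
  else if 10 < PySem.List.count pattern "CONDITIONAL" then
    "High Complexity"
  else if 3 < PySem.List.count pattern "FOR_LOOP" + PySem.List.count pattern "WHILE_LOOP" then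
    "Loop-Heavy Processing"
  else
    "Standard Logic"

-- ===== PORT B =====
-- one loop step: state = (has_download, has_regex, try_c, cond_c, loop_c)
def classifyStep (st : Bool × Bool × Nat × Nat × Nat) (token : String) : Bool × Bool × Nat × Nat × Nat :=
  let (dl, rx, tc, cc, lc) := st
  if PySem.Str.startswith token "CALL:" then
    let low := PySem.Str.lower token
    (dl || PySem.Str.isIn "download" low, rx || PySem.Str.isIn "regex" low, tc, cc, lc)
  else if token == "TRY_EXCEPT" then (dl, rx, tc + 1, cc, lc)
  else if token == "CONDITIONAL" then (dl, rx, tc, cc + 1, lc)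
  else if token == "FOR_LOOP" || token == "WHILE_LOOP" then (dl, rx, tc, cc, lc + 1)
  else (dl, rx, tc, cc, lc)

def classify_pattern_py_alt (pattern : List String) : String :=
  let (dl, rx, tc, cc, lc) := pattern.foldl classifyStep (false, false, 0, 0, 0)
  if dl then "Web Scraping"
  else if rx then "Regex Extraction"
  else if 2 ≤ tc then "Defensive Programming"
  else if 10 < cc then "High Complexity"
  else if 3 < lc then "Loop-Heavy Processing"
  else "Standard Logic"

-- ===== PRECONDITION & SPEC =====
def Spec_classify_pattern_py (pattern : List String) (out : String) : Prop := out = classify_pattern_py_alt pattern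
instance (pattern : List String) (out : String) : Decidable (Spec_classify_pattern_py pattern out) := by unfold Spec_classify_pattern_py; infer_instance

-- ===== CLAIM (what is proved, stated in full; the proofs are below) =====
def Claim_equal_classify_pattern_py : Prop := ∀ (pattern : List String), Dom_classify_pattern_py pattern → Spec_classify_pattern_py pattern (classify_pattern_py pattern)

-- ===== LEMMAS AND PROOFS =====
theorem startswith_ne_try (t : String) (h : PySem.Str.startswith t "CALL:" = true) : t ≠ "TRY_EXCEPT" := by
  intro he; subst he; exact absurd h (by decide)

theorem startswith_ne_cond (t : String) (h : PySem.Str.startswith t "CALL:" = true) : t ≠ "CONDITIONAL" := by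
  intro he; subst he; exact absurd h (by decide)

theorem startswith_ne_for (t : String) (h : PySem.Str.startswith t "CALL:" = true) : t ≠ "FOR_LOOP" := by
  intro he; subst he; exact absurd h (by decide)

theorem startswith_ne_while (t : String) (h : PySem.Str.startswith t "CALL:" = true) : t ≠ "WHILE_LOOP" := by
  intro he; subst he; exact absurd h (by decide)

theorem classify_foldl (pattern : List String) (dl rx : Bool) (tc cc lc : Nat) :
    pattern.foldl classifyStep (dl, rx, tc, cc, lc) =
      (dl || pattern.any (fun t => PySem.Str.startswith t "CALL:" && PySem.Str.isIn "download" (PySem.Str.lower t)),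
       rx || pattern.any (fun t => PySem.Str.startswith t "CALL:" && PySem.Str.isIn "regex" (PySem.Str.lower t)),
       tc + PySem.List.count pattern "TRY_EXCEPT",
       cc + PySem.List.count pattern "CONDITIONAL",
       lc + (PySem.List.count pattern "FOR_LOOP" + PySem.List.count pattern "WHILE_LOOP")) := by
  induction pattern generalizing dl rx tc cc lc with
  | nil => simp [PySem.List.count]
  | cons t rest ih =>
    simp only [List.foldl_cons, classifyStep]
    by_cases hs : PySem.Str.startswith t "CALL:" = true
    · have hs' : PySem.Chars.startswith t.toList ['C', 'A', 'L', 'L', ':'] = true := by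
        simpa [PySem.Str.startswith] using hs
      have h1 := startswith_ne_try t hs
      have h2 := startswith_ne_cond t hs
      have h3 := startswith_ne_for t hs
      have h4 := startswith_ne_while t hs
      simp [ih, PySem.List.count, h1, h2, h3, h4, hs', Bool.or_assoc]
    · have hs' : PySem.Chars.startswith t.toList ['C', 'A', 'L', 'L', ':'] = false := by
        simpa [PySem.Str.startswith] using hs
      simp only [hs]
      by_cases h1 : t = "TRY_EXCEPT"
      · subst h1
        have eh1 : PySem.Chars.startswith ['T', 'R', 'Y', '_', 'E', 'X', 'C', 'E', 'P', 'T'] ['C', 'A', 'L', 'L', ':'] = false := by decide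
        simp [ih, PySem.List.count, eh1]
        omega
      by_cases h2 : t = "CONDITIONAL"
      · subst h2
        have eh2 : PySem.Chars.startswith ['C', 'O', 'N', 'D', 'I', 'T', 'I', 'O', 'N', 'A', 'L'] ['C', 'A', 'L', 'L', ':'] = false := by decide
        simp [ih, PySem.List.count, eh2]
        omega
      by_cases h3 : t = "FOR_LOOP"
      · subst h3
        have eh3 : PySem.Chars.startswith ['F', 'O', 'R', '_', 'L', 'O', 'O', 'P'] ['C', 'A', 'L', 'L', ':'] = false := by decide
        simp [ih, PySem.List.count, eh3]
        omega
      by_cases h4 : t = "WHILE_LOOP"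
      · subst h4
        have eh4 : PySem.Chars.startswith ['W', 'H', 'I', 'L', 'E', '_', 'L', 'O', 'O', 'P'] ['C', 'A', 'L', 'L', ':'] = false := by decide
        simp [ih, PySem.List.count, eh4]
        omega
      · simp [ih, PySem.List.count, hs', h1, h2, h3, h4,
          (by simp [h1] : (t == "TRY_EXCEPT") = false),
          (by simp [h2] : (t == "CONDITIONAL") = false),
          (by simp [h3] : (t == "FOR_LOOP") = false),
          (by simp [h4] : (t == "WHILE_LOOP") = false)]

-- ===== VERDICT (by name: the statement is the Claim_ definition above) =====
theorem classify_pattern_py_spec : Claim_equal_classify_pattern_py := by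
  intro pattern _
  unfold Spec_classify_pattern_py classify_pattern_py classify_pattern_py_alt
  rw [classify_foldl]
  simp only [Bool.false_or, Nat.zero_add]
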